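-- pv_equiv track=rewrite | github.com/AsgeirNoM/aioimaplib | aioimaplib/aioimaplib.py | int2ap
-- ===== SOURCE A (Python) =====
-- def int2ap(num):
--     """Convert integer to A-P string representation."""
--     val = ''
--     ap = 'ABCDEFGHIJKLMNOP'
--     num = int(abs(num))
--     while num:
--         num, mod = divmod(num, 16)
--         val += ap[mod:mod + 1]
--     return val
-- ===== SOURCE B (Python) =====
-- _TRANS = str.maketrans('0123456789abcdef', 'ABCDEFGHIJKLMNOP')
--
-- def int2ap(num):
--     """Convert integer to A-P string representation."""
--     n = int(abs(num))
--     if not n: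
--         return ''
--     return ('%x' % n).translate(_TRANS)[::-1]
-- ===== Notes on version B (the rewrite author's own statement) =====
-- stated objective: idiomatic
-- what changed: Replaces the manual divmod accumulation loop with library hex formatting ('%x'), a str.translate table mapping hex digits to A-P, and a string reversal (the original emits digits least-significant-first); the falsy guard keeps the empty-string result A gives when the magnitude vanishes.
import Mathlib
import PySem

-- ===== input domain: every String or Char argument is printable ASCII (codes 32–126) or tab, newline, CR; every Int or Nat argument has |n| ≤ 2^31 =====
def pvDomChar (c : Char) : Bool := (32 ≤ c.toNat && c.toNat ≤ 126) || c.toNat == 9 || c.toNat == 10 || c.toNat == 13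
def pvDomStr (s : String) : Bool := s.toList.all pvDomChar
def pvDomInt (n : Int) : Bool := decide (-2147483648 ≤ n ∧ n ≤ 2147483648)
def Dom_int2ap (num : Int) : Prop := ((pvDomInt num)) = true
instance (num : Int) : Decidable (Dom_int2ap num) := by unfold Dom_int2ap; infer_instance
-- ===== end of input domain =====

-- B replaces A's divmod accumulation loop with hex formatting + a translation table + a reversal (idiomatic).

-- ===== PORT A =====
def apTable : List Char := "ABCDEFGHIJKLMNOP".toList

-- the while loop: num, mod = divmod(num, 16); val += ap[mod:mod+1]
-- (num is nonnegative after int(abs(num)), so Python's divmod is Nat div/mod)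
def int2apLoop (num : Nat) (val : List Char) : List Char :=
  if num = 0 then val
  else int2apLoop (num / 16) (val ++ (apTable.drop (num % 16)).take 1)
decreasing_by exact Nat.div_lt_self (Nat.pos_of_ne_zero (by assumption)) (by omega)

def int2ap (num : Int) : String :=
  String.mk (int2apLoop num.natAbs [])

-- ===== PORT B =====
-- '%x' % n for n > 0: most-significant hex digit first
def hexChar (d : Nat) : Char := ("0123456789abcdef".toList).getD d ' '

def hexStr (n : Nat) : List Char :=
  if n < 16 then [hexChar n]
  else hexStr (n / 16) ++ [hexChar (n % 16)]
decreasing_by exact Nat.div_lt_self (by omega) (by omega)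

-- str.maketrans('0123456789abcdef', 'ABCDEFGHIJKLMNOP') and .translate
def trTable : List (Char × Char) := List.zip "0123456789abcdef".toList "ABCDEFGHIJKLMNOP".toList

def trChar (c : Char) : Char := (trTable.lookup c).getD c

def int2ap_alt (num : Int) : String :=
  let n := num.natAbs
  if n = 0 then ""
  else String.mk (((hexStr n).map trChar).reverse)

-- ===== PRECONDITION & SPEC =====
def Spec_int2ap (num : Int) (out : String) : Prop := out = int2ap_alt num
instance (num : Int) (out : String) : Decidable (Spec_int2ap num out) := by unfold Spec_int2ap; infer_instance

-- ===== CLAIM (what is proved, stated in full; the proofs are below) =====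
def Claim_equal_int2ap : Prop := ∀ (num : Int), Dom_int2ap num → Spec_int2ap num (int2ap num)

-- ===== LEMMAS AND PROOFS =====

-- A's one-char slice ap[m:m+1] equals the translated hex digit, for every digit m < 16
lemma digit_eq (m : Nat) (h : m < 16) :
    (apTable.drop m).take 1 = [trChar (hexChar m)] := by
  interval_cases m <;> decide

-- the reversed translated hex string, with 0 ↦ []
def bList (n : Nat) : List Char := if n = 0 then [] else ((hexStr n).map trChar).reverse

lemma loop_eq (n : Nat) : ∀ val : List Char, int2apLoop n val = val ++ bList n := by
  induction n using Nat.strong_induction_on with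
  | _ n ih =>
    intro val
    by_cases h0 : n = 0
    · simp [int2apLoop, bList, h0]
    · rw [int2apLoop, if_neg h0, ih (n / 16) (Nat.div_lt_self (Nat.pos_of_ne_zero h0) (by omega)),
        digit_eq (n % 16) (Nat.mod_lt _ (by omega))]
      unfold bList
      rw [if_neg h0]
      by_cases hlt : n < 16
      · have h1 : n / 16 = 0 := Nat.div_eq_of_lt hlt
        have h2 : n % 16 = n := Nat.mod_eq_of_lt hlt
        simp [hexStr, hlt, h1, h2]
      · have h1 : n / 16 ≠ 0 := (Nat.div_pos (by omega) (by omega)).ne'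
        rw [show hexStr n = hexStr (n / 16) ++ [hexChar (n % 16)] from by
          rw [hexStr, if_neg hlt], if_neg h1]
        simp

-- ===== VERDICT (by name: the statement is the Claim_ definition above) =====
theorem int2ap_spec : Claim_equal_int2ap := by
  intro num _
  show int2ap num = int2ap_alt num
  unfold int2ap int2ap_alt
  rw [loop_eq]
  by_cases h : num.natAbs = 0
  · simp [bList, h]; rfl
  · simp [bList, h]
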